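-- pv_equiv track=rewrite | github.com/petrvanblokland/TYPETR-Assistants | assistantLib/similarity/cosineSimilarity.py | getRange
-- ===== SOURCE A (Python) =====
-- def getRange(values, zones):
--     if zones is None: return values
--     ok = []
--     for v in values:
--         for mn, mx in zones:
--             if mn <= v <= mx:
--                 if v not in ok:
--                     ok.append(v)
--     ok.sort()
--     return ok
-- ===== SOURCE B (Python) =====
-- def _bisect_left(sv, x, lo, hi):
--     while lo < hi:
--         mid = (lo + hi) // 2
--         if sv[mid] < x:
--             lo = mid + 1
--         else:
--             hi = mid
--     return lo
--
--
-- def _bisect_right(sv, x, lo, hi):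
--     while lo < hi:
--         mid = (lo + hi) // 2
--         if x < sv[mid]:
--             hi = mid
--         else:
--             lo = mid + 1
--     return lo
--
--
-- def getRange(values, zones):
--     if zones is None:
--         return values
--     sv = sorted(values)
--     found = set()
--     for mn, mx in zones:
--         i = _bisect_left(sv, mn, 0, len(sv))
--         j = _bisect_right(sv, mx, 0, len(sv))
--         found.update(sv[i:j])
--     return sorted(found)
-- ===== Notes on version B (the rewrite author's own statement) =====
-- stated objective: alternative
-- what changed: Replaces A's scan of every zone for every value with a linear 'v not in ok' dedup test by sorting the values once and, for each zone, binary-searching (hand-rolled bisect_left/bisect_right) the contiguous slice of in-zone values into a set, then returning the sorted set.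
import Mathlib
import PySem

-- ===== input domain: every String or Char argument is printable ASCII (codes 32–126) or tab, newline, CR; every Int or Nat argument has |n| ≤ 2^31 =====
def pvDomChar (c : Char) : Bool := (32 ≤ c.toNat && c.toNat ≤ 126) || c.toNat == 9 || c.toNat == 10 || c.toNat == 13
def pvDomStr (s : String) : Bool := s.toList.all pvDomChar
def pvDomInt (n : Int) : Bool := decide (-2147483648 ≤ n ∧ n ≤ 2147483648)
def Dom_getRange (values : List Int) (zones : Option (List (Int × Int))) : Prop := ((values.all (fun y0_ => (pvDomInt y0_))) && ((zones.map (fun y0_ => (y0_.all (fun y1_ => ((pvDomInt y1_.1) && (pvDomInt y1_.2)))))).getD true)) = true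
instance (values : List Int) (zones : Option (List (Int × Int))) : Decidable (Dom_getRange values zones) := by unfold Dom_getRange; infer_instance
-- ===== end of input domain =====

-- B sorts the values once and binary-searches each zone's contiguous slice into a set,
-- instead of A's scan of every zone for every value with a linear dedup test (alternative algorithm).

-- ===== PORT A =====
def getRange (values : List Int) (zones : Option (List (Int × Int))) : List Int :=
  match zones with
  | none => values
  | some zs =>
    let ok := values.foldl (fun ok v =>
      zs.foldl (fun ok z =>
        if z.1 ≤ v ∧ v ≤ z.2 then (if v ∈ ok then ok else ok ++ [v]) else ok) ok) ([] : List Int)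
    PySem.List.sorted ok (fun x => x)

-- ===== PORT B =====
-- transliteration of Source B's _bisect_left (the while-loop as recursion on hi - lo);
-- sv[mid] is ported as getD with default 0: every call keeps lo ≤ mid < hi ≤ len, so it is in range
def blLoop (sv : List Int) (x : Int) (lo hi : Nat) : Nat :=
  if h : lo < hi then
    let mid := (lo + hi) / 2
    if sv.getD mid 0 < x then blLoop sv x (mid + 1) hi else blLoop sv x lo mid
  else lo
termination_by hi - lo
decreasing_by all_goals omega

-- transliteration of Source B's _bisect_right
def brLoop (sv : List Int) (x : Int) (lo hi : Nat) : Nat :=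
  if h : lo < hi then
    let mid := (lo + hi) / 2
    if x < sv.getD mid 0 then brLoop sv x lo mid else brLoop sv x (mid + 1) hi
  else lo
termination_by hi - lo
decreasing_by all_goals omega

def getRange_alt (values : List Int) (zones : Option (List (Int × Int))) : List Int :=
  match zones with
  | none => values
  | some zs =>
    let sv := PySem.List.sorted values (fun x => x)
    let found := zs.foldl (fun found z =>
      let i := blLoop sv z.1 0 sv.length
      let j := brLoop sv z.2 0 sv.length
      PySem.Set.update found (PySem.List.slice sv (some (i : Int)) (some (j : Int))))
      PySem.Set.empty
    PySem.List.sorted found (fun x => x)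

-- ===== PRECONDITION & SPEC =====
def Spec_getRange (values : List Int) (zones : Option (List (Int × Int))) (out : List Int) : Prop := out = getRange_alt values zones
instance (values : List Int) (zones : Option (List (Int × Int))) (out : List Int) : Decidable (Spec_getRange values zones out) := by unfold Spec_getRange; infer_instance

-- ===== CLAIM (what is proved, stated in full; the proofs are below) =====
def Claim_equal_getRange : Prop := ∀ (values : List Int) (zones : Option (List (Int × Int))), Dom_getRange values zones → Spec_getRange values zones (getRange values zones)

-- ===== LEMMAS AND PROOFS =====

-- a ≤-sorted list is monotone in getD (indices in range)
lemma getD_mono (sv : List Int) (hs : sv.Pairwise (· ≤ ·)) :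
    ∀ p q, p ≤ q → q < sv.length → sv.getD p 0 ≤ sv.getD q 0 := by
  intro p q hpq hq
  rcases Nat.eq_or_lt_of_le hpq with rfl | hlt
  · exact le_refl _
  · rw [List.getD_eq_getElem _ _ (by omega), List.getD_eq_getElem _ _ hq]
    exact List.pairwise_iff_getElem.mp hs p q (by omega) hq hlt

-- invariant of Source B's _bisect_left: everything left of the result is < x, everything right is ≥ x
lemma blLoop_spec (sv : List Int) (x : Int)
    (hs : sv.Pairwise (· ≤ ·)) :
    ∀ n lo hi, hi - lo ≤ n → hi ≤ sv.length → lo ≤ hi →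
      (∀ j < lo, sv.getD j 0 < x) →
      (∀ j, hi ≤ j → j < sv.length → x ≤ sv.getD j 0) →
      lo ≤ blLoop sv x lo hi ∧ blLoop sv x lo hi ≤ hi ∧
      (∀ j < blLoop sv x lo hi, sv.getD j 0 < x) ∧
      (∀ j, blLoop sv x lo hi ≤ j → j < sv.length → x ≤ sv.getD j 0) := by
  intro n
  induction n with
  | zero =>
    intro lo hi hn hlen hle h3 h4
    have : lo = hi := by omega
    subst this
    rw [blLoop]
    simp only [lt_irrefl, dite_false]
    exact ⟨le_refl _, le_refl _, h3, fun j hj hjl => h4 j hj hjl⟩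
  | succ n ih =>
    intro lo hi hn hlen hle h3 h4
    rw [blLoop]
    by_cases h : lo < hi
    · simp only [h, dite_true]
      by_cases hm : sv.getD ((lo + hi) / 2) 0 < x
      · simp only [hm, if_true]
        have h3' : ∀ j < (lo + hi) / 2 + 1, sv.getD j 0 < x := by
          intro j hj
          exact lt_of_le_of_lt (getD_mono sv hs j ((lo + hi) / 2) (by omega) (by omega)) hm
        have := ih ((lo + hi) / 2 + 1) hi (by omega) hlen (by omega) h3' h4
        exact ⟨by omega, this.2.1, this.2.2.1, this.2.2.2⟩
      · simp only [hm, if_false]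
        rw [not_lt] at hm
        have h4' : ∀ j, (lo + hi) / 2 ≤ j → j < sv.length → x ≤ sv.getD j 0 := by
          intro j hj hjl
          exact le_trans hm (getD_mono sv hs ((lo + hi) / 2) j hj hjl)
        have := ih lo ((lo + hi) / 2) (by omega) (by omega) (by omega) h3 h4'
        exact ⟨this.1, by omega, this.2.2.1, this.2.2.2⟩
    · simp only [h, dite_false]
      exact ⟨le_refl _, hle, h3, fun j hj hjl => h4 j (by omega) hjl⟩

-- invariant of Source B's _bisect_right: everything left of the result is ≤ x, everything right is > x
lemma brLoop_spec (sv : List Int) (x : Int)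
    (hs : sv.Pairwise (· ≤ ·)) :
    ∀ n lo hi, hi - lo ≤ n → hi ≤ sv.length → lo ≤ hi →
      (∀ j < lo, sv.getD j 0 ≤ x) →
      (∀ j, hi ≤ j → j < sv.length → x < sv.getD j 0) →
      lo ≤ brLoop sv x lo hi ∧ brLoop sv x lo hi ≤ hi ∧
      (∀ j < brLoop sv x lo hi, sv.getD j 0 ≤ x) ∧
      (∀ j, brLoop sv x lo hi ≤ j → j < sv.length → x < sv.getD j 0) := by
  intro n
  induction n with
  | zero =>
    intro lo hi hn hlen hle h3 h4
    have : lo = hi := by omega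
    subst this
    rw [brLoop]
    simp only [lt_irrefl, dite_false]
    exact ⟨le_refl _, le_refl _, h3, fun j hj hjl => h4 j hj hjl⟩
  | succ n ih =>
    intro lo hi hn hlen hle h3 h4
    rw [brLoop]
    by_cases h : lo < hi
    · simp only [h, dite_true]
      by_cases hm : x < sv.getD ((lo + hi) / 2) 0
      · simp only [hm, if_true]
        have h4' : ∀ j, (lo + hi) / 2 ≤ j → j < sv.length → x < sv.getD j 0 := by
          intro j hj hjl
          exact lt_of_lt_of_le hm (getD_mono sv hs ((lo + hi) / 2) j hj hjl)
        have := ih lo ((lo + hi) / 2) (by omega) (by omega) (by omega) h3 h4'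
        exact ⟨this.1, by omega, this.2.2.1, this.2.2.2⟩
      · simp only [hm, if_false]
        rw [not_lt] at hm
        have h3' : ∀ j < (lo + hi) / 2 + 1, sv.getD j 0 ≤ x := by
          intro j hj
          exact le_trans (getD_mono sv hs j ((lo + hi) / 2) (by omega) (by omega)) hm
        have := ih ((lo + hi) / 2 + 1) hi (by omega) hlen (by omega) h3' h4
        exact ⟨by omega, this.2.1, this.2.2.1, this.2.2.2⟩
    · simp only [h, dite_false]
      exact ⟨le_refl _, hle, h3, fun j hj hjl => h4 j (by omega) hjl⟩

-- the slice between the two bisection points of a sorted list holds exactly its elements in [mn, mx]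
lemma mem_zone_slice (sv : List Int) (hs : sv.Pairwise (· ≤ ·)) (mn mx v : Int) :
    v ∈ PySem.List.slice sv (some ((blLoop sv mn 0 sv.length : Nat) : Int))
        (some ((brLoop sv mx 0 sv.length : Nat) : Int)) ↔
      v ∈ sv ∧ mn ≤ v ∧ v ≤ mx := by
  obtain ⟨-, hi2, hi3, hi4⟩ := blLoop_spec sv mn hs sv.length 0 sv.length (by omega) (le_refl _)
    (by omega) (by omega) (fun j hj hjl => by omega)
  obtain ⟨-, hj2, hj3, hj4⟩ := brLoop_spec sv mx hs sv.length 0 sv.length (by omega) (le_refl _)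
    (by omega) (by omega) (fun j hj hjl => by omega)
  set i := blLoop sv mn 0 sv.length with hidef
  set j := brLoop sv mx 0 sv.length with hjdef
  rw [PySem.List.slice_natCast]
  constructor
  · intro hv
    rw [List.mem_iff_getElem] at hv
    obtain ⟨m, hm, hveq⟩ := hv
    have hlen : ((sv.drop i).take (j - i)).length ≤ min (j - i) (sv.length - i) := by
      simp [List.length_take, List.length_drop]
    have hm1 : m < j - i := by omega
    have hm2 : m < sv.length - i := by omega
    have hk : i + m < sv.length := by omega
    have heq : ((sv.drop i).take (j - i))[m] = sv[i + m]'hk := by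
      rw [List.getElem_take, List.getElem_drop]
    rw [heq] at hveq
    have hg : sv.getD (i + m) 0 = v := by rw [List.getD_eq_getElem _ _ hk, hveq]
    refine ⟨hveq ▸ List.getElem_mem hk, ?_, ?_⟩
    · have := hi4 (i + m) (by omega) hk; omega
    · have := hj3 (i + m) (by omega); omega
  · rintro ⟨hv, hmn, hmx⟩
    rw [List.mem_iff_getElem] at hv
    obtain ⟨k, hk, hveq⟩ := hv
    have hg : sv.getD k 0 = v := by rw [List.getD_eq_getElem _ _ hk, hveq]
    have hik : i ≤ k := by
      by_contra hc
      have := hi3 k (by omega); omega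
    have hkj : k < j := by
      by_contra hc
      have := hj4 k (by omega) hk; omega
    rw [List.mem_iff_getElem]
    refine ⟨k - i, by simp [List.length_take, List.length_drop]; omega, ?_⟩
    have hk2 : k - i < j - i := by omega
    have hk3 : k - i < sv.length - i := by omega
    rw [List.getElem_take, List.getElem_drop]
    simp only [show i + (k - i) = k by omega, hveq]

lemma innerA_of_mem (zs : List (Int × Int)) (v : Int) (ok : List Int) (hv : v ∈ ok) :
    zs.foldl (fun ok z =>
      if z.1 ≤ v ∧ v ≤ z.2 then (if v ∈ ok then ok else ok ++ [v]) else ok) ok = ok := by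
  induction zs with
  | nil => rfl
  | cons z zs ih => simp [List.foldl, hv, ih]

lemma innerA_eq (zs : List (Int × Int)) (v : Int) (ok : List Int) :
    zs.foldl (fun ok z =>
      if z.1 ≤ v ∧ v ≤ z.2 then (if v ∈ ok then ok else ok ++ [v]) else ok) ok
    = if (∃ z ∈ zs, z.1 ≤ v ∧ v ≤ z.2) ∧ v ∉ ok then ok ++ [v] else ok := by
  induction zs generalizing ok with
  | nil => simp
  | cons z zs ih =>
    rw [List.foldl_cons]
    by_cases hz : z.1 ≤ v ∧ v ≤ z.2
    · by_cases hv : v ∈ ok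
      · rw [if_pos hz, if_pos hv, ih]
        simp [hv]
      · rw [if_pos hz, if_neg hv, innerA_of_mem zs v (ok ++ [v]) (by simp)]
        simp [hz, hv]
    · rw [if_neg hz, ih]
      have hiff : (∃ z' ∈ zs, z'.1 ≤ v ∧ v ≤ z'.2) ↔ (∃ z' ∈ z :: zs, z'.1 ≤ v ∧ v ≤ z'.2) := by
        constructor
        · rintro ⟨z', hz', h⟩; exact ⟨z', List.mem_cons_of_mem _ hz', h⟩
        · rintro ⟨z', hz', h⟩
          rcases List.mem_cons.mp hz' with rfl | hz''
          · exact absurd h hz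
          · exact ⟨z', hz'', h⟩
      exact if_congr (and_congr_left' hiff) rfl rfl

lemma okA_spec (zs : List (Int × Int)) :
    ∀ (values : List Int) (acc : List Int), acc.Nodup →
      (values.foldl (fun ok v =>
        zs.foldl (fun ok z =>
          if z.1 ≤ v ∧ v ≤ z.2 then (if v ∈ ok then ok else ok ++ [v]) else ok) ok) acc).Nodup ∧
      (∀ x, x ∈ values.foldl (fun ok v =>
        zs.foldl (fun ok z =>
          if z.1 ≤ v ∧ v ≤ z.2 then (if v ∈ ok then ok else ok ++ [v]) else ok) ok) acc ↔
        x ∈ acc ∨ (x ∈ values ∧ ∃ z ∈ zs, z.1 ≤ x ∧ x ≤ z.2)) := by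
  intro values
  induction values with
  | nil => intro acc hacc; simpa using hacc
  | cons v vs ih =>
    intro acc hacc
    rw [List.foldl_cons, innerA_eq]
    by_cases hc : (∃ z ∈ zs, z.1 ≤ v ∧ v ≤ z.2) ∧ v ∉ acc
    · rw [if_pos hc]
      have hnd : (acc ++ [v]).Nodup := by
        refine hacc.append (List.nodup_singleton v) ?_
        intro a ha hb
        rw [List.mem_singleton] at hb
        subst hb
        exact hc.2 ha
      obtain ⟨h1, h2⟩ := ih (acc ++ [v]) hnd
      refine ⟨h1, fun x => ?_⟩
      rw [h2 x]
      simp only [List.mem_append, List.mem_cons, List.not_mem_nil, or_false]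
      constructor
      · rintro ((hx | rfl) | ⟨hx, hz⟩)
        · exact Or.inl hx
        · exact Or.inr ⟨Or.inl rfl, hc.1⟩
        · exact Or.inr ⟨Or.inr hx, hz⟩
      · rintro (hx | ⟨(rfl | hx), hz⟩)
        · exact Or.inl (Or.inl hx)
        · exact Or.inl (Or.inr rfl)
        · exact Or.inr ⟨hx, hz⟩
    · rw [if_neg hc]
      obtain ⟨h1, h2⟩ := ih acc hacc
      refine ⟨h1, fun x => ?_⟩
      rw [h2 x]
      simp only [List.mem_cons]
      constructor
      · rintro (hx | ⟨hx, hz⟩)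
        · exact Or.inl hx
        · exact Or.inr ⟨Or.inr hx, hz⟩
      · rintro (hx | ⟨(rfl | hx), hz⟩)
        · exact Or.inl hx
        · rcases not_and_or.mp hc with h | h
          · exact absurd hz h
          · exact Or.inl (not_not.mp h)
        · exact Or.inr ⟨hx, hz⟩

lemma foundB_spec (sv : List Int) (hs : sv.Pairwise (· ≤ ·)) :
    ∀ (zs : List (Int × Int)) (acc : PySem.Set Int), acc.Nodup →
      (zs.foldl (fun found z =>
        PySem.Set.update found (PySem.List.slice sv (some ((blLoop sv z.1 0 sv.length : Nat) : Int))
          (some ((brLoop sv z.2 0 sv.length : Nat) : Int)))) acc).Nodup ∧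
      (∀ x, x ∈ zs.foldl (fun found z =>
        PySem.Set.update found (PySem.List.slice sv (some ((blLoop sv z.1 0 sv.length : Nat) : Int))
          (some ((brLoop sv z.2 0 sv.length : Nat) : Int)))) acc ↔
        x ∈ acc ∨ (x ∈ sv ∧ ∃ z ∈ zs, z.1 ≤ x ∧ x ≤ z.2)) := by
  intro zs
  induction zs with
  | nil => intro acc hacc; simpa using hacc
  | cons z zs ih =>
    intro acc hacc
    rw [List.foldl_cons]
    obtain ⟨h1, h2⟩ := ih _ (PySem.Set.nodup_update acc _ hacc)
    refine ⟨h1, fun x => ?_⟩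
    rw [h2 x, PySem.Set.mem_update, mem_zone_slice sv hs z.1 z.2 x]
    simp only [List.mem_cons]
    constructor
    · rintro ((hx | ⟨hx, hz1, hz2⟩) | ⟨hx, zz, hzz, hz⟩)
      · exact Or.inl hx
      · exact Or.inr ⟨hx, z, Or.inl rfl, hz1, hz2⟩
      · exact Or.inr ⟨hx, zz, Or.inr hzz, hz⟩
    · rintro (hx | ⟨hx, zz, (rfl | hzz), hz⟩)
      · exact Or.inl (Or.inl hx)
      · exact Or.inl (Or.inr ⟨hx, hz⟩)
      · exact Or.inr ⟨hx, zz, hzz, hz⟩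

-- ===== VERDICT (by name: the statement is the Claim_ definition above) =====
theorem getRange_spec : Claim_equal_getRange := by
  intro values zones _
  unfold Spec_getRange
  cases zones with
  | none => rfl
  | some zs =>
    simp only [getRange, getRange_alt]
    set sv := PySem.List.sorted values (fun x => x) with hsv
    have hs : sv.Pairwise (· ≤ ·) := PySem.List.sorted_pairwise values (fun x => x)
    obtain ⟨hnd1, hm1⟩ := okA_spec zs values [] List.nodup_nil
    obtain ⟨hnd2, hm2⟩ := foundB_spec sv hs zs PySem.Set.empty List.nodup_nil
    apply PySem.List.sorted_eq_sorted_of_perm _ _ (fun x => x) (fun a b h => h)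
    rw [List.perm_ext_iff_of_nodup hnd1 hnd2]
    intro x
    rw [hm1 x, hm2 x, PySem.List.mem_sorted]
    simp
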